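-- pv_equiv track=rewrite | github.com/pabloschwarzenberg/grader | tema10_ej3/tema10_ej3_f54440b90735b1ab74bbf20f12714a62.py | invertir_lista
-- ===== SOURCE A (Python) =====
-- def invertir_lista(lista):
--   lista_invertida = []
--   for a in range(-1, -len(lista) - 1, -1):
--     lista_invertida.append(lista[a])
--   inv = ""
--   for a in lista_invertida:
--     inv += a
--   return inv
-- ===== SOURCE B (Python) =====
-- def invertir_lista(lista):
--   n = len(lista)
--   if n == 0:
--     return ""
--   if n == 1:
--     return lista[0]
--   m = n // 2
--   return invertir_lista(lista[m:]) + invertir_lista(lista[:m])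
-- ===== Notes on version B (the rewrite author's own statement) =====
-- stated objective: alternative
-- what changed: Replaces A's two staged loops (build a reversed list by negative indexing, then concatenate it element by element) with a divide-and-conquer recursion: the reversal of the list is the reversal of its right half concatenated with the reversal of its left half, with singleton and empty base cases.
import Mathlib
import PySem

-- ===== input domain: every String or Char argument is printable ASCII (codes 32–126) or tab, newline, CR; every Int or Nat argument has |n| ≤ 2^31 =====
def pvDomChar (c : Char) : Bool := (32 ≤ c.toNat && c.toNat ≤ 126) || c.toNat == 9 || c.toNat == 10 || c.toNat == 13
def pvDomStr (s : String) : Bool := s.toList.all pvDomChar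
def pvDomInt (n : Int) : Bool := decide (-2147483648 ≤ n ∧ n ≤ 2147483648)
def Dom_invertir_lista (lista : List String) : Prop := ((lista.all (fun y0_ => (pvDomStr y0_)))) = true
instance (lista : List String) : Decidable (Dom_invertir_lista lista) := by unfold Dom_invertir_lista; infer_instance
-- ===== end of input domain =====

-- B replaces A's two staged loops (reversed list via negative indexing, then concatenation)
-- with a divide-and-conquer recursion: reverse(l) = reverse(right half) ++ reverse(left half).
-- ===== PORT A =====
-- pyGetD with default "" ports lista[a]; the index is always in range for these ranges, so the default is unreachable.
def invertir_lista (lista : List String) : String :=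
  let lista_invertida : List String :=
    (PySem.List.pyRange (-1) (-(lista.length : Int) - 1) (-1)).foldl
      (fun acc a => acc ++ [PySem.List.pyGetD lista a ""]) []
  lista_invertida.foldl (fun inv a => inv ++ a) ""

-- ===== PORT B =====
-- divide and conquer: invertir(lista[m:]) + invertir(lista[:m]) with m = n // 2
def invertir_lista_alt (lista : List String) : String :=
  let n := lista.length
  if n = 0 then ""
  else if n = 1 then PySem.List.pyGetD lista 0 ""
  else
    let m := n / 2
    invertir_lista_alt (PySem.List.slice lista (some (m : Int)) none) ++
      invertir_lista_alt (PySem.List.slice lista none (some (m : Int)))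
termination_by lista.length
decreasing_by
  · rw [PySem.List.slice_from_natCast]; simp only [List.length_drop]; omega
  · rw [PySem.List.slice_to_natCast]; simp only [List.length_take]; omega

-- ===== PRECONDITION & SPEC =====
def Spec_invertir_lista (lista : List String) (out : String) : Prop := out = invertir_lista_alt lista
instance (lista : List String) (out : String) : Decidable (Spec_invertir_lista lista out) := by unfold Spec_invertir_lista; infer_instance

-- ===== CLAIM (what is proved, stated in full; the proofs are below) =====
def Claim_equal_invertir_lista : Prop := ∀ (lista : List String), Dom_invertir_lista lista → Spec_invertir_lista lista (invertir_lista lista)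

-- ===== LEMMAS AND PROOFS =====
def sjoin : List String → String
  | [] => ""
  | x :: xs => x ++ sjoin xs

theorem foldl_append_eq (l : List String) (s : String) :
    l.foldl (fun inv a => inv ++ a) s = s ++ sjoin l := by
  induction l generalizing s with
  | nil => simp [sjoin]
  | cons x xs ih =>
      simp only [List.foldl_cons, ih, sjoin]
      rw [String.append_assoc]

theorem invertida_eq_reverse (lista : List String) :
    (PySem.List.pyRange (-1) (-(lista.length : Int) - 1) (-1)).foldl
      (fun acc a => acc ++ [PySem.List.pyGetD lista a ""]) [] = lista.reverse := by
  rw [PySem.List.foldl_append_singleton_eq_map, PySem.List.pyRange_neg_one]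
  have hlen : ((-1 : Int) - (-(lista.length : Int) - 1)).toNat = lista.length := by omega
  rw [hlen, List.map_map]
  apply List.ext_getElem
  · simp
  · intro k h1 h2
    have hk : k < lista.length := by simpa using h1
    simp only [List.nil_append, List.getElem_map, List.getElem_range, Function.comp]
    have he : (-1 : Int) - (k : Int) = -((k + 1 : Nat) : Int) := by push_cast; ring
    rw [he, PySem.List.pyGetD_neg_natCast (hk := by omega) (hk' := by omega),
      List.getElem_reverse]
    congr 1
    omega

theorem invertir_lista_A_eq (lista : List String) :
    invertir_lista lista = sjoin lista.reverse := by
  unfold invertir_lista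
  rw [invertida_eq_reverse, foldl_append_eq]
  simp

theorem sjoin_append (a b : List String) : sjoin (a ++ b) = sjoin a ++ sjoin b := by
  induction a with
  | nil => simp [sjoin, String.empty_append]
  | cons x xs ih => simp [sjoin, ih, String.append_assoc]

theorem invertir_lista_alt_eq (lista : List String) :
    invertir_lista_alt lista = sjoin lista.reverse := by
  induction hn : lista.length using Nat.strong_induction_on generalizing lista with
  | _ n ih =>
  rw [invertir_lista_alt]
  subst hn
  by_cases h0 : lista.length = 0
  · rw [if_pos h0]
    rw [List.length_eq_zero_iff.mp h0]; rfl
  · rw [if_neg h0]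
    by_cases h1 : lista.length = 1
    · rw [if_pos h1]
      obtain ⟨x, hx⟩ := List.length_eq_one_iff.mp h1
      subst hx
      simp [sjoin, PySem.List.pyGetD, PySem.List.pyIdx?, PySem.List.pyGet?, String.append_empty]
    · rw [if_neg h1]
      show invertir_lista_alt (PySem.List.slice lista (some ((lista.length / 2 : Nat) : Int)) none) ++
          invertir_lista_alt (PySem.List.slice lista none (some ((lista.length / 2 : Nat) : Int))) =
          sjoin lista.reverse
      rw [PySem.List.slice_from_natCast, PySem.List.slice_to_natCast,
        ih _ (by simp; omega) _ rfl, ih _ (by simp; omega) _ rfl]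
      rw [← sjoin_append, ← List.reverse_append, List.take_append_drop]

-- ===== VERDICT (by name: the statement is the Claim_ definition above) =====
theorem invertir_lista_spec : Claim_equal_invertir_lista := by
  intro lista _
  unfold Spec_invertir_lista
  rw [invertir_lista_A_eq, invertir_lista_alt_eq]
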